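-- pv_equiv track=rewrite | github.com/chen-si-cs/CSE291A-AI-Agent | agents/grid_rl_agent.py | _next_after
-- ===== SOURCE A (Python) =====
-- def _next_after(obs: dict, offset: int) -> str:
--     """Return variable name `offset` steps after the next free variable."""
--     inv = obs.get("inventory") or {}
--     existing = {int(k[1:]) for k in inv
--                 if k.startswith("x") and k[1:].isdigit()}
--     n = 1
--     while n in existing:
--         n += 1
--     return f"x{n + offset - 1}"
-- ===== SOURCE B (Python) =====
-- def _next_after(obs: dict, offset: int) -> str:
--     """Return variable name `offset` steps after the next free variable."""
--     inv = obs.get("inventory") or {}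
--     used = sorted(int(k[1:]) for k in inv
--                   if k.startswith("x") and k[1:].isdigit())
--     cand = 1
--     for v in used:
--         if v < cand:
--             continue
--         if v == cand:
--             cand += 1
--         else:
--             break
--     return f"x{cand + offset - 1}"
-- ===== Notes on version B (the rewrite author's own statement) =====
-- stated objective: alternative
-- what changed: Replaces the set-build plus while-loop membership probing (n=1,2,... until n not in set) with collecting the used indices into a sorted list and finding the first gap in one scan with a running candidate.
import Mathlib
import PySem

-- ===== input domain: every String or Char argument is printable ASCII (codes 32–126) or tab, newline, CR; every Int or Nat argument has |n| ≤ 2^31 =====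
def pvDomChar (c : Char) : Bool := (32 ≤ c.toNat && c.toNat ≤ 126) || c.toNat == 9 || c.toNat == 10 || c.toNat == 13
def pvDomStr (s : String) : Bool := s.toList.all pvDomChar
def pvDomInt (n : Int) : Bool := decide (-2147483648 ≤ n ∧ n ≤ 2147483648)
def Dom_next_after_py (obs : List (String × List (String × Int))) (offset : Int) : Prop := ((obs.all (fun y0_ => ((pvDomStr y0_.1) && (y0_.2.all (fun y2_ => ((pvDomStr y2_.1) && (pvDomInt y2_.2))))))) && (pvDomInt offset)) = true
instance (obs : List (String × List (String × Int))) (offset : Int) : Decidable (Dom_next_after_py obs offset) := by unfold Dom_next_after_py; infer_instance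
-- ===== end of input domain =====

-- ===== PORT A =====
-- B replaces A's set + while-loop membership probing by a sorted single-pass gap scan; same return value.

-- termination measure for A's `while n in existing: n += 1` loop (cited by nextAfterLoop's decreasing_by)
theorem pvLoopMeasure_lt (s : List Int) (n : Int) (h : n ∈ s) :
    (s.filter (fun x => decide (n + 1 ≤ x))).length < (s.filter (fun x => decide (n ≤ x))).length := by
  have h1 : s.filter (fun x => decide (n + 1 ≤ x))
      = (s.filter (fun x => decide (n ≤ x))).filter (fun x => decide (n + 1 ≤ x)) := by
    rw [List.filter_filter]
    apply List.filter_congr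
    intro x _
    by_cases hx : n + 1 ≤ x
    · have hx' : n ≤ x := by omega
      simp [hx, hx']
    · simp [hx]
  rw [h1]
  exact List.length_filter_lt_length_iff_exists.mpr
    ⟨n, List.mem_filter.mpr ⟨h, by simp⟩, by simp⟩

-- the set comprehension {int(k[1:]) for k in inv if k.startswith("x") and k[1:].isdigit()}
def aExisting (inv : List (String × Int)) : PySem.Set Int :=
  inv.foldl (fun acc kv =>
    if PySem.Str.startswith kv.1 "x"
        && PySem.Str.strIsdigit (PySem.Str.slice kv.1 (some 1) none) then
      match PySem.Int.ofStr? (PySem.Str.slice kv.1 (some 1) none) with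
      | some m => PySem.Set.add acc m      -- int(k[1:]); isdigit guarantees the parse succeeds
      | none => acc
    else acc) PySem.Set.empty

-- while n in existing: n += 1
def nextAfterLoop (s : PySem.Set Int) (n : Int) : Int :=
  if PySem.Set.contains s n then nextAfterLoop s (n + 1) else n
termination_by (s.filter (fun x => decide (n ≤ x))).length
decreasing_by
  rename_i h
  exact pvLoopMeasure_lt s n (by simpa [PySem.Set.contains] using h)

def next_after_py (obs : List (String × List (String × Int))) (offset : Int) : String :=
  -- obs.get("inventory") or {} : a missing key gives None -> {}, and an empty dict is falsy -> {}
  let inv := ((PySem.Dict.mk obs).get? "inventory").getD []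
  let existing := aExisting inv
  let n := nextAfterLoop existing 1
  String.ofList ('x' :: PySem.Int.toChars (n + offset - 1))      -- f"x{n + offset - 1}"

-- ===== PORT B =====
-- sorted(int(k[1:]) for k in inv if k.startswith("x") and k[1:].isdigit())
def bUsed (inv : List (String × Int)) : List Int :=
  inv.filterMap (fun kv =>
    if PySem.Str.startswith kv.1 "x"
        && PySem.Str.strIsdigit (PySem.Str.slice kv.1 (some 1) none) then
      PySem.Int.ofStr? (PySem.Str.slice kv.1 (some 1) none)
    else none)

-- the for-loop over the sorted list with the running candidate
def bScan : List Int → Int → Int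
  | [], cand => cand
  | v :: t, cand =>
    if v < cand then bScan t cand
    else if v == cand then bScan t (cand + 1)
    else cand

def next_after_py_alt (obs : List (String × List (String × Int))) (offset : Int) : String :=
  let inv := ((PySem.Dict.mk obs).get? "inventory").getD []
  let used := PySem.List.sorted (bUsed inv) (fun x => x) false
  let cand := bScan used 1
  String.ofList ('x' :: PySem.Int.toChars (cand + offset - 1))

-- ===== PRECONDITION & SPEC =====
def Spec_next_after_py (obs : List (String × List (String × Int))) (offset : Int) (out : String) : Prop := out = next_after_py_alt obs offset
instance (obs : List (String × List (String × Int))) (offset : Int) (out : String) : Decidable (Spec_next_after_py obs offset out) := by unfold Spec_next_after_py; infer_instance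

-- ===== CLAIM (what is proved, stated in full; the proofs are below) =====
def Claim_equal_next_after_py : Prop := ∀ (obs : List (String × List (String × Int))) (offset : Int), Dom_next_after_py obs offset → Spec_next_after_py obs offset (next_after_py obs offset)

-- ===== LEMMAS AND PROOFS =====

-- A's set comprehension is exactly set(bUsed inv)
theorem aExisting_go (inv : List (String × Int)) (acc : PySem.Set Int) :
    inv.foldl (fun acc kv =>
      if PySem.Str.startswith kv.1 "x"
          && PySem.Str.strIsdigit (PySem.Str.slice kv.1 (some 1) none) then
        match PySem.Int.ofStr? (PySem.Str.slice kv.1 (some 1) none) with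
        | some m => PySem.Set.add acc m
        | none => acc
      else acc) acc = (bUsed inv).foldl PySem.Set.add acc := by
  induction inv generalizing acc with
  | nil => simp [bUsed]
  | cons kv t ih =>
    simp only [bUsed, List.filterMap_cons, List.foldl_cons]
    split
    · rename_i hc
      cases hparse : PySem.Int.ofStr? (PySem.Str.slice kv.1 (some 1) none) with
      | none => simpa [bUsed, hc, hparse] using ih acc
      | some m => simpa [bUsed, hc, hparse] using ih (PySem.Set.add acc m)
    · rename_i hc
      simpa [bUsed, hc] using ih acc

theorem aExisting_eq_ofList (inv : List (String × Int)) :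
    aExisting inv = PySem.Set.ofList (bUsed inv) := by
  rw [PySem.Set.ofList_eq_foldl]
  exact aExisting_go inv PySem.Set.empty

theorem mem_aExisting (inv : List (String × Int)) (x : Int) :
    x ∈ aExisting inv ↔ x ∈ bUsed inv := by
  rw [aExisting_eq_ofList]
  exact PySem.Set.mem_ofList _ _

-- characterisation of A's while loop: first value ≥ n outside s
theorem nextAfterLoop_spec (s : PySem.Set Int) (n : Int) :
    n ≤ nextAfterLoop s n ∧ nextAfterLoop s n ∉ s ∧
      ∀ m, n ≤ m → m < nextAfterLoop s n → m ∈ s := by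
  fun_induction nextAfterLoop s n with
  | case1 n h ih =>
    have hmem : n ∈ s := by simpa [PySem.Set.contains] using h
    refine ⟨by omega, ih.2.1, ?_⟩
    intro m hm1 hm2
    by_cases hmn : m = n
    · exact hmn ▸ hmem
    · exact ih.2.2 m (by omega) hm2
  | case2 n h =>
    have hmem : n ∉ s := by simpa [PySem.Set.contains] using h
    exact ⟨le_refl n, hmem, fun m hm1 hm2 => absurd (lt_of_le_of_lt hm1 hm2) (lt_irrefl n)⟩

-- characterisation of B's scan over an ascending list: first value ≥ cand outside l
theorem bScan_spec (l : List Int) (cand : Int) (hs : l.Pairwise (fun a b => a ≤ b)) :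
    cand ≤ bScan l cand ∧ bScan l cand ∉ l ∧
      ∀ m, cand ≤ m → m < bScan l cand → m ∈ l := by
  induction l generalizing cand with
  | nil => exact ⟨le_refl cand, by simp [bScan], fun m h1 h2 => absurd (lt_of_le_of_lt h1 h2) (lt_irrefl cand)⟩
  | cons v t ih =>
    have hv : ∀ b ∈ t, v ≤ b := (List.pairwise_cons.mp hs).1
    have ht := (List.pairwise_cons.mp hs).2
    by_cases h1 : v < cand
    · obtain ⟨ia, ib, ic⟩ := ih cand ht
      simp only [bScan, if_pos h1]
      refine ⟨ia, ?_, fun m hm1 hm2 => List.mem_cons_of_mem v (ic m hm1 hm2)⟩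
      intro hmem
      rcases List.mem_cons.mp hmem with heq | hmem'
      · omega
      · exact ib hmem'
    · by_cases h2 : v = cand
      · obtain ⟨ia, ib, ic⟩ := ih (cand + 1) ht
        simp only [bScan, if_neg h1, if_pos (show (v == cand) = true by simp [h2])]
        refine ⟨by omega, ?_, ?_⟩
        · intro hmem
          rcases List.mem_cons.mp hmem with heq | hmem'
          · omega
          · exact ib hmem'
        · intro m hm1 hm2
          by_cases hmc : m = cand
          · exact hmc ▸ h2 ▸ List.mem_cons_self
          · exact List.mem_cons_of_mem v (ic m (by omega) hm2)
      · simp only [bScan, if_neg h1, if_neg (show ¬ (v == cand) = true by simp [h2])]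
        refine ⟨le_refl cand, ?_, fun m hm1 hm2 => absurd (lt_of_le_of_lt hm1 hm2) (lt_irrefl cand)⟩
        intro hmem
        rcases List.mem_cons.mp hmem with heq | hmem'
        · omega
        · exact absurd (hv cand hmem') (by omega)

-- the least integer ≥ 1 outside a membership predicate is unique
theorem mex_unique (P : Int → Prop) (r1 r2 : Int)
    (h1 : 1 ≤ r1 ∧ ¬ P r1 ∧ ∀ m, 1 ≤ m → m < r1 → P m)
    (h2 : 1 ≤ r2 ∧ ¬ P r2 ∧ ∀ m, 1 ≤ m → m < r2 → P m) : r1 = r2 := by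
  rcases lt_trichotomy r1 r2 with h | h | h
  · exact absurd (h2.2.2 r1 h1.1 h) h1.2.1
  · exact h
  · exact absurd (h1.2.2 r2 h2.1 h) h2.2.1

-- ===== VERDICT (by name: the statement is the Claim_ definition above) =====
theorem next_after_py_spec : Claim_equal_next_after_py := by
  intro obs offset _
  unfold Spec_next_after_py next_after_py next_after_py_alt
  set inv := ((PySem.Dict.mk obs).get? "inventory").getD [] with hinv
  have hsorted : (PySem.List.sorted (bUsed inv) (fun x => x) false).Pairwise (fun a b => a ≤ b) :=
    PySem.List.sorted_pairwise (bUsed inv) (fun x => x)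
  have hA := nextAfterLoop_spec (aExisting inv) 1
  have hB := bScan_spec (PySem.List.sorted (bUsed inv) (fun x => x) false) 1 hsorted
  have hmemS : ∀ x, x ∈ PySem.List.sorted (bUsed inv) (fun x => x) false ↔ x ∈ aExisting inv := by
    intro x
    rw [PySem.List.mem_sorted, mem_aExisting]
  have heq : nextAfterLoop (aExisting inv) 1
      = bScan (PySem.List.sorted (bUsed inv) (fun x => x) false) 1 := by
    apply mex_unique (fun m => m ∈ aExisting inv)
    · exact hA
    · refine ⟨hB.1, ?_, ?_⟩
      · rw [← hmemS]; exact hB.2.1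
      · intro m hm1 hm2
        rw [← hmemS]
        exact hB.2.2 m hm1 hm2
  simp only [heq]
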